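-- pv_equiv track=rewrite | github.com/nwayyanant/tipitaka-poc-starter | etl/app/chunk-split.py | subchunk_ranges
-- ===== SOURCE A (Python) =====
-- from typing import List, Dict, Any, Tuple
--
-- def subchunk_ranges(chunk_len: int, sub_size: int) -> List[Tuple[int, int]]:
--     """
--     1-based inclusive ranges within a chunk.
--     """
--     ranges = []
--     start = 1
--     while start <= chunk_len:
--         end = min(start + sub_size - 1, chunk_len)
--         ranges.append((start, end))
--         start = end + 1
--     return ranges
-- ===== SOURCE B (Python) =====
-- from typing import List, Tuple
--
-- def subchunk_ranges(chunk_len: int, sub_size: int) -> List[Tuple[int, int]]: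
--     """
--     1-based inclusive ranges within a chunk.
--     """
--     n = (chunk_len + sub_size - 1) // sub_size if chunk_len > 0 else 0
--     return [(i * sub_size + 1, min((i + 1) * sub_size, chunk_len)) for i in range(n)]
-- ===== Notes on version B (the rewrite author's own statement) =====
-- stated objective: simpler
-- what changed: Replaces the stateful while-loop with a running start accumulator by a closed-form count of subchunks (ceiling division) and a comprehension emitting each range directly from its index.
import Mathlib
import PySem

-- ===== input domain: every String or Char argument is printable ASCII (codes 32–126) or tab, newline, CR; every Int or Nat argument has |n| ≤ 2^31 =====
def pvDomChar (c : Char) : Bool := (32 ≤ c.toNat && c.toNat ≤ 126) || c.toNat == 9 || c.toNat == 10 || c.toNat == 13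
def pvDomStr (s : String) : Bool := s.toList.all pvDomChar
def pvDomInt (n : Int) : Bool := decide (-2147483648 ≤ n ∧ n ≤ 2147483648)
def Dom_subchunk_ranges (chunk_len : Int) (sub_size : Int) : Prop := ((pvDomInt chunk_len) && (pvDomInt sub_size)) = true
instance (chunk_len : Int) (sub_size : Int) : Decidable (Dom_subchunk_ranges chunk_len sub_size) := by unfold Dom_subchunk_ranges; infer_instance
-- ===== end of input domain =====

-- B replaces A's stateful while-loop by a closed-form subchunk count (ceiling division)
-- and index-based generation of the ranges; objective: simpler. Not faster (both linear).


-- ===== PORT A =====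
-- A's while-loop; fuel only makes the recursion total (with sub_size ≥ 1 at most
-- chunk_len iterations happen, so the fuel never runs out inside Pre_).
def pvLoopA (fuel : Nat) (chunk_len sub_size start : Int) (acc : List (Int × Int)) : List (Int × Int) :=
  match fuel with
  | 0 => acc
  | f + 1 =>
    if start ≤ chunk_len then
      let e := min (start + sub_size - 1) chunk_len
      pvLoopA f chunk_len sub_size (e + 1) (acc ++ [(start, e)])
    else acc

def subchunk_ranges (chunk_len : Int) (sub_size : Int) : List (Int × Int) :=
  pvLoopA (chunk_len.toNat + 1) chunk_len sub_size 1 []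

-- ===== PORT B =====
def subchunk_ranges_alt (chunk_len : Int) (sub_size : Int) : List (Int × Int) :=
  let n : Int := if chunk_len > 0 then PySem.Int.floordiv (chunk_len + sub_size - 1) sub_size else 0
  (PySem.List.pyRange 0 n 1).map (fun i => (i * sub_size + 1, min ((i + 1) * sub_size) chunk_len))

-- ===== PRECONDITION & SPEC =====
-- Pre_ excludes chunk_len ≥ 1 with sub_size ≤ 0, where A never returns (the while-loop
-- runs forever) and B raises ZeroDivisionError (sub_size = 0) or returns [].
def Pre_subchunk_ranges (chunk_len : Int) (sub_size : Int) : Prop :=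
  chunk_len ≤ 0 ∨ 1 ≤ sub_size
instance (chunk_len : Int) (sub_size : Int) : Decidable (Pre_subchunk_ranges chunk_len sub_size) := by unfold Pre_subchunk_ranges; infer_instance

def pvWitness_subchunk_ranges : Int × Int := (10, 3)

def Spec_subchunk_ranges (chunk_len : Int) (sub_size : Int) (out : List (Int × Int)) : Prop := out = subchunk_ranges_alt chunk_len sub_size
instance (chunk_len : Int) (sub_size : Int) (out : List (Int × Int)) : Decidable (Spec_subchunk_ranges chunk_len sub_size out) := by unfold Spec_subchunk_ranges; infer_instance

-- ===== CLAIM (what is proved, stated in full; the proofs are below) =====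
def Claim_equal_subchunk_ranges : Prop := ∀ (chunk_len : Int) (sub_size : Int), Dom_subchunk_ranges chunk_len sub_size → Pre_subchunk_ranges chunk_len sub_size → Spec_subchunk_ranges chunk_len sub_size (subchunk_ranges chunk_len sub_size)

-- ===== LEMMAS AND PROOFS =====

lemma pvLoopA_done (fuel : Nat) (cl ss start : Int) (acc : List (Int × Int))
    (h : ¬ start ≤ cl) : pvLoopA fuel cl ss start acc = acc := by
  cases fuel <;> simp [pvLoopA, h]

-- For ss ≥ 1 and n the ceiling of cl/ss: index i produces one more range iff i*ss+1 ≤ cl.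
lemma pv_lt_n_iff (cl ss i : Int) (hss : 1 ≤ ss) :
    i < PySem.Int.floordiv (cl + ss - 1) ss ↔ i * ss + 1 ≤ cl := by
  have h := (PySem.Int.le_floordiv_iff_mul_le (a := cl + ss - 1) (b := ss) (q := i + 1) (by omega))
  have hm : (i + 1) * ss = i * ss + ss := by ring
  constructor
  · intro hi
    have := h.mp (by omega)
    omega
  · intro hi
    have : (i + 1) * ss ≤ cl + ss - 1 := by omega
    have := h.mpr this
    omega

lemma pvLoopA_eq (cl ss : Int) (hss : 1 ≤ ss) :
    ∀ (fuel : Nat) (i : Int) (acc : List (Int × Int)),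
      PySem.Int.floordiv (cl + ss - 1) ss ≤ i + fuel →
      pvLoopA fuel cl ss (i * ss + 1) acc =
        acc ++ (PySem.List.pyRange i (PySem.Int.floordiv (cl + ss - 1) ss) 1).map
          (fun j => (j * ss + 1, min ((j + 1) * ss) cl)) := by
  intro fuel
  induction fuel with
  | zero =>
    intro i acc hf
    rw [PySem.List.pyRange_one_eq_nil (by omega)]
    simp [pvLoopA]
  | succ f ih =>
    intro i acc hf
    by_cases hi : i < PySem.Int.floordiv (cl + ss - 1) ss
    · have hcond : i * ss + 1 ≤ cl := (pv_lt_n_iff cl ss i hss).mp hi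
      rw [PySem.List.pyRange_one_cons hi]
      simp only [pvLoopA, if_pos hcond]
      have he : i * ss + 1 + ss - 1 = (i + 1) * ss := by ring
      rw [he]
      by_cases hi1 : i + 1 < PySem.Int.floordiv (cl + ss - 1) ss
      · have hc1 : (i + 1) * ss + 1 ≤ cl := (pv_lt_n_iff cl ss (i + 1) hss).mp hi1
        have hmin : min ((i + 1) * ss) cl = (i + 1) * ss := by omega
        rw [hmin, ih (i + 1) (acc ++ [(i * ss + 1, (i + 1) * ss)]) (by omega)]
        rw [List.append_assoc]
        simp [hmin]
      · have hc1 : ¬ ((i + 1) * ss + 1 ≤ cl) := fun h => hi1 ((pv_lt_n_iff cl ss (i + 1) hss).mpr h)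
        have hmin : min ((i + 1) * ss) cl = cl := by omega
        rw [hmin, pvLoopA_done f cl ss (cl + 1) _ (by omega)]
        rw [PySem.List.pyRange_one_eq_nil (by omega)]
        simp [hmin]
    · have hcond : ¬ (i * ss + 1 ≤ cl) := fun h => hi ((pv_lt_n_iff cl ss i hss).mpr h)
      rw [pvLoopA_done (f + 1) cl ss _ _ hcond]
      rw [PySem.List.pyRange_one_eq_nil (by omega)]
      simp

-- ===== VERDICT (by name: the statement is the Claim_ definition above) =====
theorem subchunk_ranges_spec : Claim_equal_subchunk_ranges := by
  intro cl ss hdom hpre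
  unfold Spec_subchunk_ranges subchunk_ranges subchunk_ranges_alt
  by_cases hcl : 0 < cl
  · have hss : 1 ≤ ss := by
      rcases hpre with h | h
      · omega
      · exact h
    have hn_le : PySem.Int.floordiv (cl + ss - 1) ss ≤ cl := by
      by_contra h
      have := (pv_lt_n_iff cl ss cl hss).mp (by omega)
      nlinarith
    have := pvLoopA_eq cl ss hss (cl.toNat + 1) 0 [] (by omega)
    simp only [zero_mul, zero_add] at this
    rw [this]
    simp [hcl]
  · rw [pvLoopA_done _ cl ss 1 [] (by omega)]
    simp only [if_neg hcl]
    rw [PySem.List.pyRange_one_eq_nil (by omega)]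
    simp
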